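-- pv_equiv track=rewrite | github.com/kaya53/daily-algorithm | IN-PROGRESS/B15989_123plus4/B15989_123plus4.py | solution
-- ===== SOURCE A (Python) =====
-- def solution(n):
--     memo = [[0, 0] for _ in range(n+1)]
--     memo[1][0] = 1
--     if n > 1: memo[2] = [1, 1]
--     if n > 2: memo[3] = [2, 1]
--     for i in range(4, n+1):
--         # 1이 있는 부분은 그 전 요소의 합
--         memo[i][0] = sum(memo[i-1])
--         # 1이 없는 부분 => 2개 전 요소의 합
--         memo[i][1] = memo[i-2][1]
--         # 3의 배수 => += 1 해주기
--         if i % 3 == 0: memo[i][1] += 1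
--     return sum(memo[n])
-- ===== SOURCE B (Python) =====
-- _A0 = (0, 1, 1, 2, 3, 4)
--
-- def solution(n):
--     q, r = divmod(n, 6)
--     a = 3 * q * q + (r + 2) * q + _A0[r]
--     b = q + (0 if r == 1 else 1)
--     return a + b
-- ===== Notes on version B (the rewrite author's own statement) =====
-- stated objective: faster
-- what changed: Replaced the O(n) DP table (memo[i] pairs built by a loop) with a closed-form formula: with q, r = divmod(n, 6), the answer is a quadratic polynomial 3q^2 + (r+2)q + A0[r] plus q + [r != 1], returned in O(1).
-- outside the precondition, e.g. on solution(0): A raises IndexError, B returns 1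
import Mathlib
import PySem

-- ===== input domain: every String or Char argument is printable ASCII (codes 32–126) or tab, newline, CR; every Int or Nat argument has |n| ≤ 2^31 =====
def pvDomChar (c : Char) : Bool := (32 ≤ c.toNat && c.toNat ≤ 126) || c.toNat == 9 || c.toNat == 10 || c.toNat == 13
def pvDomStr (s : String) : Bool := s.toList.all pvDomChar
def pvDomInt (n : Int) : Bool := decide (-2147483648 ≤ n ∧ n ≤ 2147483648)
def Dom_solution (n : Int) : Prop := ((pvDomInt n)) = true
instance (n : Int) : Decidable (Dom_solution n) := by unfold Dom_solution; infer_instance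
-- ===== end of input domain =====

-- B replaces A's O(n) DP table by a closed-form quadratic in n (split by n mod 6): objective = faster (asymptotic).

-- ===== PORT A =====
-- Python's memo list of [a, b] pairs is held as an Array of pairs (O(1) update); memGet/memSet are
-- exact for the nonnegative in-range indices A uses on every input admitted by Pre_ (n ≥ 1)
def memGet (m : Array (Int × Int)) (i : Int) : Int × Int := m.getD i.toNat (0, 0)
def memSet (m : Array (Int × Int)) (i : Int) (v : Int × Int) : Array (Int × Int) := m.setIfInBounds i.toNat v

-- the body of the 'for i in range(4, n+1)' loop
def solutionLoop : Nat → Int → Array (Int × Int) → Array (Int × Int)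
  | 0, _, memo => memo
  | fuel+1, i, memo =>
    let prev := memGet memo (i-1)
    -- memo[i][0] = sum(memo[i-1])
    let memo := memSet memo i (prev.1 + prev.2, (memGet memo i).2)
    -- memo[i][1] = memo[i-2][1]
    let memo := memSet memo i ((memGet memo i).1, (memGet memo (i-2)).2)
    -- if i % 3 == 0: memo[i][1] += 1
    let memo := if PySem.Int.mod i 3 = 0 then
        memSet memo i ((memGet memo i).1, (memGet memo i).2 + 1)
      else memo
    solutionLoop fuel (i+1) memo

def solution (n : Int) : Int :=
  let memo := Array.replicate (n+1).toNat ((0:Int), (0:Int))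
  -- memo[1][0] = 1  (in range whenever A does not raise, i.e. n ≥ 1)
  let memo := memSet memo 1 (1, (memGet memo 1).2)
  let memo := if n > 1 then memSet memo 2 (1, 1) else memo
  let memo := if n > 2 then memSet memo 3 (2, 1) else memo
  let memo := solutionLoop (n - 3).toNat 4 memo   -- range(4, n+1) has (n-3).toNat steps
  let last := memGet memo n
  last.1 + last.2

-- ===== PORT B =====
def solution_alt (n : Int) : Int :=
  let q := PySem.Int.floordiv n 6
  let r := PySem.Int.mod n 6
  let a := 3 * q * q + (r + 2) * q + PySem.List.pyGetD [0, 1, 1, 2, 3, 4] r 0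
  let b := q + (if r = 1 then 0 else 1)
  a + b

-- ===== PRECONDITION & SPEC =====
-- Pre_ excludes n ≤ 0, on which A raises IndexError (memo[1] on a too-short list).
def Pre_solution (n : Int) : Prop := 1 ≤ n
instance (n : Int) : Decidable (Pre_solution n) := by unfold Pre_solution; infer_instance
def pvWitness_solution : Int := 5

def Spec_solution (n : Int) (out : Int) : Prop := out = solution_alt n
instance (n : Int) (out : Int) : Decidable (Spec_solution n out) := by unfold Spec_solution; infer_instance

-- ===== CLAIM (what is proved, stated in full; the proofs are below) =====
def Claim_equal_solution : Prop := ∀ (n : Int), Dom_solution n → Pre_solution n → Spec_solution n (solution n)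

-- ===== LEMMAS AND PROOFS =====

-- specification-side recurrences: fA k / fB k are memo[k][0] / memo[k][1]
def fB : Nat → Int
  | 0 => 0 | 1 => 0 | 2 => 1 | 3 => 1
  | k+4 => fB (k+2) + (if (k+4) % 3 = 0 then 1 else 0)

def fA : Nat → Int
  | 0 => 0 | 1 => 1 | 2 => 1 | 3 => 2
  | k+4 => fA (k+3) + fB (k+3)

-- closed forms
def A0fun (r : Int) : Int :=
  if r = 0 then 0 else if r = 1 then 1 else if r = 2 then 1 else if r = 3 then 2 else if r = 4 then 3 else 4

def cfa (n : Int) : Int := 3 * (n/6) * (n/6) + (n%6 + 2) * (n/6) + A0fun (n%6)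
def cfb (n : Int) : Int := n/6 + (if n%6 = 1 then 0 else 1)

theorem solution_alt_eq_cf (n : Int) : solution_alt n = cfa n + cfb n := by
  have hq : PySem.Int.floordiv n 6 = n / 6 := PySem.Int.floordiv_eq_ediv_of_pos (by norm_num)
  have hr : PySem.Int.mod n 6 = n % 6 := PySem.Int.mod_eq_emod_of_pos (by norm_num)
  have hr0 : 0 ≤ n % 6 := Int.emod_nonneg n (by norm_num)
  have hr6 : n % 6 < 6 := Int.emod_lt_of_pos n (by norm_num)
  simp only [solution_alt, cfa, cfb, hq, hr]
  have : PySem.List.pyGetD [(0:Int), 1, 1, 2, 3, 4] (n % 6) 0 = A0fun (n % 6) := by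
    set r := n % 6 with hrdef
    interval_cases r <;> simp [A0fun, PySem.List.pyGetD, PySem.List.pyIdx?]
  rw [this]

theorem cf_step_b (m : Int) (hm : 4 ≤ m) :
    cfb m = cfb (m-2) + (if m % 3 = 0 then 1 else 0) := by
  simp only [cfb]; omega

theorem cfa_val (q r : Int) (h0 : 0 ≤ r) (h6 : r < 6) :
    cfa (6*q+r) = 3*q*q + (r+2)*q + A0fun r := by
  have h1 : (6*q+r)/6 = q := by omega
  have h2 : (6*q+r)%6 = r := by omega
  simp only [cfa, h1, h2]

theorem cfb_val (q r : Int) (h0 : 0 ≤ r) (h6 : r < 6) :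
    cfb (6*q+r) = q + (if r = 1 then 0 else 1) := by
  have h1 : (6*q+r)/6 = q := by omega
  have h2 : (6*q+r)%6 = r := by omega
  simp only [cfb, h1, h2]

theorem cf_step_a (m : Int) (hm : 4 ≤ m) : cfa m = cfa (m-1) + cfb (m-1) := by
  clear hm
  obtain ⟨q, r, hm', h0, h6⟩ : ∃ q r, m = 6*q+r ∧ 0 ≤ r ∧ r < 6 :=
    ⟨m/6, m%6, by omega, by omega, by omega⟩
  subst hm'
  rcases (by omega : r = 0 ∨ r = 1 ∨ r = 2 ∨ r = 3 ∨ r = 4 ∨ r = 5) with h|h|h|h|h|h <;> subst h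
  · rw [show (6*q+(0:Int)-1) = 6*(q-1)+5 by ring,
        cfa_val q 0 (by norm_num) (by norm_num), cfa_val (q-1) 5 (by norm_num) (by norm_num),
        cfb_val (q-1) 5 (by norm_num) (by norm_num)]
    simp only [A0fun]; norm_num; ring
  · rw [show (6*q+(1:Int)-1) = 6*q+0 by ring,
        cfa_val q 1 (by norm_num) (by norm_num), cfa_val q 0 (by norm_num) (by norm_num),
        cfb_val q 0 (by norm_num) (by norm_num)]
    simp only [A0fun]; norm_num; ring
  · rw [show (6*q+(2:Int)-1) = 6*q+1 by ring,
        cfa_val q 2 (by norm_num) (by norm_num), cfa_val q 1 (by norm_num) (by norm_num),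
        cfb_val q 1 (by norm_num) (by norm_num)]
    simp only [A0fun]; norm_num; ring
  · rw [show (6*q+(3:Int)-1) = 6*q+2 by ring,
        cfa_val q 3 (by norm_num) (by norm_num), cfa_val q 2 (by norm_num) (by norm_num),
        cfb_val q 2 (by norm_num) (by norm_num)]
    simp only [A0fun]; norm_num; ring
  · rw [show (6*q+(4:Int)-1) = 6*q+3 by ring,
        cfa_val q 4 (by norm_num) (by norm_num), cfa_val q 3 (by norm_num) (by norm_num),
        cfb_val q 3 (by norm_num) (by norm_num)]
    simp only [A0fun]; norm_num; ring
  · rw [show (6*q+(5:Int)-1) = 6*q+4 by ring,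
        cfa_val q 5 (by norm_num) (by norm_num), cfa_val q 4 (by norm_num) (by norm_num),
        cfb_val q 4 (by norm_num) (by norm_num)]
    simp only [A0fun]; norm_num; ring

-- fA/fB agree with the closed forms
theorem f_eq_cf : ∀ k : Nat, 1 ≤ k → fA k = cfa k ∧ fB k = cfb k := by
  intro k
  induction k using Nat.strong_induction_on with
  | _ k ih =>
    intro hk
    match k, hk with
    | 1, _ => exact ⟨by decide, by decide⟩
    | 2, _ => exact ⟨by decide, by decide⟩
    | 3, _ => exact ⟨by decide, by decide⟩
    | (j+4), _ =>
      obtain ⟨ha3, hb3⟩ := ih (j+3) (by omega) (by omega)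
      obtain ⟨_, hb2⟩ := ih (j+2) (by omega) (by omega)
      have h2 : (((j+4 : Nat)) : Int) = (j:Int)+4 := by push_cast; ring
      constructor
      · rw [fA, ha3, hb3]
        have hstep := cf_step_a ((j:Int)+4) (by omega)
        have h1 : ((j:Int)+4) - 1 = ((j+3 : Nat) : Int) := by push_cast; ring
        rw [h2, hstep, h1]
      · rw [fB, hb2]
        have hstep := cf_step_b ((j:Int)+4) (by omega)
        have h1 : ((j:Int)+4) - 2 = ((j+2 : Nat) : Int) := by push_cast; ring
        rw [h2, hstep, h1]
        congr 1
        by_cases h : (j+4) % 3 = 0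
        · simp [h, show ((j:Int)+4) % 3 = 0 by omega]
        · simp [h, show ¬(((j:Int)+4) % 3 = 0) by omega]

-- loop invariant
theorem loop_inv : ∀ (fuel : Nat) (i : Nat) (m : Array (Int × Int)) (L : Nat),
    4 ≤ i → i + fuel = L → m.size = L →
    (∀ j : Nat, j < L → m[j]? = some (if j < i then (fA j, fB j) else (0, 0))) →
    ∀ j : Nat, j < L → (solutionLoop fuel (i : Int) m)[j]? = some (if j < L then (fA j, fB j) else (0, 0)) := by
  intro fuel
  induction fuel with
  | zero =>
    intro i m L hi hL hlen hinv j hj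
    simp only [solutionLoop]
    rw [hinv j hj]
    have h1 : j < i := by omega
    simp [hj, h1]
  | succ f ih =>
    intro i m L hi hL hlen hinv j hj
    have hiL : i < L := by omega
    -- reads
    have hget : ∀ (k : Nat) (mm : Array (Int × Int)), mm.size = L →
        (∀ jj : Nat, jj < L → mm[jj]? = some (if jj < i then (fA jj, fB jj) else (0,0))) →
        k < L → memGet mm ((k : Nat) : Int) = (if k < i then (fA k, fB k) else (0,0)) := by
      intro k mm hl hv hk
      rw [memGet, Int.toNat_natCast, Array.getD_eq_getD_getElem?, hv k hk]
      rfl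
    have h1cast : (i : Int) - 1 = ((i - 1 : Nat) : Int) := by omega
    have h2cast : (i : Int) - 2 = ((i - 2 : Nat) : Int) := by omega
    simp only [solutionLoop]
    rw [h1cast, h2cast]
    -- value written at index i after the three statements
    have hprev := hget (i-1) m hlen hinv (by omega)
    rw [if_pos (by omega)] at hprev
    -- set up the chain of memos
    set m1 := memSet m (i:Int)
        ((memGet m ((i-1:Nat):Int)).1 + (memGet m ((i-1:Nat):Int)).2,
         (memGet m (i:Int)).2) with hm1
    have hm1' : m1 = m.setIfInBounds i (fA (i-1) + fB (i-1), 0) := by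
      rw [hm1, memSet, Int.toNat_natCast, hprev]
      have := hget i m hlen hinv hiL
      rw [if_neg (by omega)] at this
      rw [this]
    have hlen1 : m1.size = L := by rw [hm1']; simp [hlen]
    have hv1 : ∀ jj : Nat, jj < L → m1[jj]? = some (if jj = i then (fA (i-1) + fB (i-1), 0) else if jj < i then (fA jj, fB jj) else (0,0)) := by
      intro jj hjj
      rw [hm1', Array.getElem?_setIfInBounds]
      by_cases h : jj = i
      · subst h; simp [hlen, hiL]
      · rw [if_neg (by omega), hinv jj hjj]
        simp [h]
    -- second read/write
    have hb2 : memGet m1 ((i-2:Nat):Int) = (fA (i-2), fB (i-2)) := by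
      rw [memGet, Int.toNat_natCast, Array.getD_eq_getD_getElem?]
      simp [hv1 (i-2) (by omega), show ¬ (i-2 = i) by omega, show i-2 < i by omega]
    have hcur1 : memGet m1 (i:Int) = (fA (i-1) + fB (i-1), 0) := by
      rw [memGet, Int.toNat_natCast, Array.getD_eq_getD_getElem?]
      simp [hv1 i hiL]
    set m2 := memSet m1 (i:Int)
        ((memGet m1 (i:Int)).1, (memGet m1 ((i-2:Nat):Int)).2) with hm2
    have hm2' : m2 = m1.setIfInBounds i (fA (i-1) + fB (i-1), fB (i-2)) := by
      rw [hm2, memSet, Int.toNat_natCast, hb2, hcur1]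
    have hlen2 : m2.size = L := by rw [hm2']; simp [hlen1]
    have hv2 : ∀ jj : Nat, jj < L → m2[jj]? = some (if jj = i then (fA (i-1) + fB (i-1), fB (i-2)) else if jj < i then (fA jj, fB jj) else (0,0)) := by
      intro jj hjj
      rw [hm2', Array.getElem?_setIfInBounds]
      by_cases h : jj = i
      · subst h; simp [hlen1, hiL]
      · rw [if_neg (by omega), hv1 jj hjj]
        simp [h]
    -- third (conditional) write
    have hmod : PySem.Int.mod (i:Int) 3 = ((i % 3 : Nat) : Int) := PySem.Int.mod_natCast i 3
    have hcur2 : memGet m2 (i:Int) = (fA (i-1) + fB (i-1), fB (i-2)) := by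
      rw [memGet, Int.toNat_natCast, Array.getD_eq_getD_getElem?]
      simp [hv2 i hiL]
    set m3 := if PySem.Int.mod (i:Int) 3 = 0 then
        memSet m2 (i:Int) ((memGet m2 (i:Int)).1, (memGet m2 (i:Int)).2 + 1)
      else m2 with hm3
    have hfbi : fB i = fB (i-2) + (if i % 3 = 0 then 1 else 0) := by
      have h4 : i = (i - 4) + 4 := by omega
      rw [h4, fB]
      have : i - 4 + 2 = i - 2 := by omega
      rw [this]
      have : i - 4 + 4 = i := by omega
      rw [this]
    have hfai : fA i = fA (i-1) + fB (i-1) := by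
      have h4 : i = (i - 4) + 4 := by omega
      rw [h4, fA]
      have : i - 4 + 3 = i - 1 := by omega
      rw [this]
      have : i - 4 + 4 = i := by omega
      rw [this]
    have hm3' : m3 = m2.setIfInBounds i (fA i, fB i) := by
      rw [hm3, hmod]
      by_cases h : i % 3 = 0
      · rw [if_pos (by exact_mod_cast congrArg (fun x : Nat => (x:Int)) h), memSet, Int.toNat_natCast, hcur2]
        rw [hfai, hfbi, if_pos h]
      · rw [if_neg (by intro hc; apply h; exact_mod_cast hc)]
        rw [hm2', hfai, hfbi, if_neg h]
        norm_num
    have hlen3 : m3.size = L := by rw [hm3']; simp [hlen2]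
    have hv3 : ∀ jj : Nat, jj < L → m3[jj]? = some (if jj < i + 1 then (fA jj, fB jj) else (0,0)) := by
      intro jj hjj
      rw [hm3', Array.getElem?_setIfInBounds]
      by_cases h : jj = i
      · subst h; simp [hlen2, hiL]
      · rw [if_neg (by omega), hv2 jj hjj]
        simp only [h, if_false]
        by_cases hlt : jj < i
        · rw [if_pos hlt, if_pos (by omega)]
        · rw [if_neg hlt, if_neg (by omega)]
    have hcast : (i : Int) + 1 = ((i + 1 : Nat) : Int) := by push_cast; ring
    rw [hcast]
    exact ih (i+1) m3 L (by omega) (by omega) hlen3 hv3 j hj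

theorem init_inv (k : Nat) (hk : 3 ≤ k) :
    ∀ j : Nat, j < k+1 →
    (memSet (memSet (memSet (Array.replicate (k+1) ((0:Int),(0:Int))) 1
        (1, (memGet (Array.replicate (k+1) ((0:Int),(0:Int))) 1).2)) 2 (1,1)) 3 (2,1))[j]?
      = some (if j < 4 then (fA j, fB j) else (0, 0)) := by
  intro j hj
  have hg : memGet (Array.replicate (k+1) ((0:Int),(0:Int))) 1 = (0,0) := by
    rw [memGet, Array.getD_eq_getD_getElem?, Array.getElem?_replicate]
    simp [show 1 < k+1 by omega]
  rw [hg]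
  have t1 : (1:Int).toNat = 1 := rfl
  have t2 : (2:Int).toNat = 2 := rfl
  have t3 : (3:Int).toNat = 3 := rfl
  simp only [memSet, t1, t2, t3]
  rw [Array.getElem?_setIfInBounds, Array.getElem?_setIfInBounds, Array.getElem?_setIfInBounds,
      Array.getElem?_replicate]
  simp only [Array.size_setIfInBounds, Array.size_replicate]
  rcases (by omega : j = 0 ∨ j = 1 ∨ j = 2 ∨ j = 3 ∨ 4 ≤ j) with h|h|h|h|h
  · subst h; norm_num [show 0 < k+1 by omega, fA, fB]
  · subst h; norm_num [show 1 < k+1 by omega, fA, fB]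
  · subst h; norm_num [show 2 < k+1 by omega, fA, fB]
  · subst h; norm_num [show 3 < k+1 by omega, fA, fB]
  · rw [if_neg (by omega), if_neg (by omega), if_neg (by omega), if_pos hj, if_neg (by omega)]
-- ===== VERDICT (by name: the statement is the Claim_ definition above) =====
theorem solution_spec : Claim_equal_solution := by
  intro n _ hpre
  unfold Spec_solution
  unfold Pre_solution at hpre
  rw [solution_alt_eq_cf]
  rcases (by omega : n = 1 ∨ n = 2 ∨ 3 ≤ n) with h|h|h
  · subst h; decide
  · subst h; decide
  · obtain ⟨k, rfl⟩ : ∃ k : Nat, n = (k:Int) := ⟨n.toNat, by omega⟩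
    have hk : 3 ≤ k := by exact_mod_cast h
    simp only [solution]
    rw [if_pos (by exact_mod_cast (by omega : (2:Int) < k)), if_pos (by exact_mod_cast (by omega : (1:Int) < k))]
    have hL : ((k:Int)+1).toNat = k+1 := by omega
    have hfuel : ((k:Int)-3).toNat = k-3 := by omega
    rw [hL, hfuel]
    have e4 : (4:Int) = ((4:Nat):Int) := by norm_num
    rw [e4]
    have hfin := loop_inv (k-3) 4
      (memSet (memSet (memSet (Array.replicate (k+1) ((0:Int),(0:Int))) 1
        (1, (memGet (Array.replicate (k+1) ((0:Int),(0:Int))) 1).2)) 2 (1,1)) 3 (2,1))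
      (k+1) (by omega) (by omega)
      (by simp [memSet])
      (init_inv k hk) k (by omega)
    rw [memGet, Int.toNat_natCast, Array.getD_eq_getD_getElem?, hfin]
    have hs := f_eq_cf k (by omega)
    simp [show k < k+1 by omega, hs.1, hs.2]
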